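-- pv_equiv track=rewrite | github.com/intel/program-optimization-advice-exploration-scripts | qaas-web/apps/common/backend/base_util.py | get_run_path_and_id
-- ===== SOURCE A (Python) =====
-- def get_run_path_and_id(path):
--     path_parts = path.split("/")
--     run_component = next((part for part in path_parts if "run_" in part), None)
--     run_id = None
--     if run_component:
--         run_id = run_component.split("_")[1]
--
--     if run_component:
--         sub_path_index = path_parts.index(run_component)
--         sub_path = "/".join(path_parts[:sub_path_index+1])
--
--     return run_id, sub_path
-- ===== SOURCE B (Python) =====
-- def get_run_path_and_id(path):
--     run_id = None
--     j = path.find("run_")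
--     if j != -1:
--         k = path.find("/", j)
--         sub_path = path if k == -1 else path[:k]
--         run_id = sub_path.split("/")[-1].split("_")[1]
--     return run_id, sub_path
-- ===== Notes on version B (the rewrite author's own statement) =====
-- stated objective: alternative
-- what changed: B never builds the component list: it searches the raw path string for the first 'run_' occurrence with str.find, cuts sub_path at the following '/' (str.find with a start index), and reads the run id off that prefix, instead of A's split-into-parts + generator scan + list.index + join of a prefix slice.
import Mathlib
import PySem

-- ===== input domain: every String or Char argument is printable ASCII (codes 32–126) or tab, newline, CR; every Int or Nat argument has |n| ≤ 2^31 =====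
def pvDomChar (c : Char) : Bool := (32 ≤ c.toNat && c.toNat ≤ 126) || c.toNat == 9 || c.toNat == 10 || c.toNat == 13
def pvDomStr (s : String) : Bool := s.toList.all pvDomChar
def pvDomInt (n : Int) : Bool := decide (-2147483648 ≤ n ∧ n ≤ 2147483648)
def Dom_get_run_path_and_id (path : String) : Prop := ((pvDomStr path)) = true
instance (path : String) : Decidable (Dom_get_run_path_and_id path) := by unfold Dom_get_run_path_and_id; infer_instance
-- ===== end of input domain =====

-- B drops A's component-list machinery (split, generator scan, list.index, join of a prefix
-- slice): it searches the raw string for the first "run_" with str.find, cuts sub_path at the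
-- next "/", and reads the id off that prefix. Equivalence is proved where a "run_" occurs in
-- the path; elsewhere both raise UnboundLocalError.

-- ===== PORT A =====
def get_run_path_and_id (path : String) : Option String × String :=
  let path_parts := (PySem.Str.split? path "/").getD []
  let run_component := path_parts.find? (fun part => PySem.Str.isIn "run_" part)
  let run_id : Option String :=
    match run_component with
    | some rc => if rc ≠ "" then some ((PySem.List.pyGet? ((PySem.Str.split? rc "_").getD []) 1).getD "") else none
    | none => none
  match run_component with
  | some rc =>
      if rc ≠ "" then
        let sub_path_index := (PySem.List.index? path_parts rc).getD 0
        let sub_path := PySem.Str.join "/" (PySem.List.slice path_parts none (some ((sub_path_index + 1 : Nat) : Int)))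
        (run_id, sub_path)
      else (run_id, "")   -- Python: UnboundLocalError on sub_path; outside Pre_
  | none => (run_id, "")  -- Python: UnboundLocalError on sub_path; outside Pre_

-- ===== PORT B =====
def get_run_path_and_id_alt (path : String) : Option String × String :=
  let j := PySem.Str.find path "run_"
  if j ≠ -1 then
    let k := PySem.Str.findFrom path "/" j
    let sub_path := if k = -1 then path else PySem.Str.slice path none (some k)
    let run_id :=
      (PySem.List.pyGet? ((PySem.Str.split?
        ((PySem.List.pyGet? ((PySem.Str.split? sub_path "/").getD []) (-1)).getD "") "_").getD []) 1).getD ""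
    (some run_id, sub_path)
  else (none, "")  -- Python: UnboundLocalError on sub_path; outside Pre_

-- ===== PRECONDITION & SPEC =====
-- Pre_ excludes exactly the paths not containing "run_": there both A and B raise
-- UnboundLocalError (sub_path is never assigned).
def Pre_get_run_path_and_id (path : String) : Prop := PySem.Str.isIn "run_" path = true
instance (path : String) : Decidable (Pre_get_run_path_and_id path) := by unfold Pre_get_run_path_and_id; infer_instance
def pvWitness_get_run_path_and_id : String := "x/run_5/y"

def Spec_get_run_path_and_id (path : String) (out : Option String × String) : Prop := out = get_run_path_and_id_alt path
instance (path : String) (out : Option String × String) : Decidable (Spec_get_run_path_and_id path out) := by unfold Spec_get_run_path_and_id; infer_instance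

-- ===== CLAIM (what is proved, stated in full; the proofs are below) =====
def Claim_equal_get_run_path_and_id : Prop := ∀ (path : String), Dom_get_run_path_and_id path → Pre_get_run_path_and_id path → Spec_get_run_path_and_id path (get_run_path_and_id path)

-- ===== LEMMAS AND PROOFS =====

-- fuel-free clone of PySem.Chars.splitOn.go for sep = "/"
def pvGoNF : List Char → List Char → List (List Char) → List (List Char)
  | [], cur, acc => (cur.reverse :: acc).reverse
  | c :: r, cur, acc => if c = '/' then pvGoNF r [] (cur.reverse :: acc) else pvGoNF r (c :: cur) acc

lemma pv_go_eq_goNF : ∀ (fuel : Nat) (l cur : List Char) (acc : List (List Char)),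
    l.length < fuel → PySem.Chars.splitOn.go ['/'] fuel l cur acc = pvGoNF l cur acc := by
  intro fuel
  induction fuel with
  | zero => intro l cur acc h; omega
  | succ f ih =>
      intro l cur acc h
      cases l with
      | nil => simp [PySem.Chars.splitOn.go, pvGoNF]
      | cons c rest =>
          have hstep : PySem.Chars.splitOn.go ['/'] (f+1) (c::rest) cur acc =
              if ('/' == c) then PySem.Chars.splitOn.go ['/'] f rest [] (cur.reverse :: acc)
              else PySem.Chars.splitOn.go ['/'] f rest (c :: cur) acc := by
            simp [PySem.Chars.splitOn.go, List.isPrefixOf]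
          rw [hstep]
          simp only [List.length_cons] at h
          by_cases hc : c = '/'
          · subst hc; simp [pvGoNF, ih rest [] (cur.reverse :: acc) (by omega)]
          · have : ('/' == c) = false := by simp [Ne.symm hc]
            rw [this]
            simp [pvGoNF, hc, ih rest (c :: cur) acc (by omega)]

lemma pv_splitOn_eq (l : List Char) : PySem.Chars.splitOn l ['/'] = pvGoNF l [] [] := by
  show PySem.Chars.splitOn.go ['/'] (l.length + 1) l [] [] = pvGoNF l [] []
  exact pv_go_eq_goNF (l.length + 1) l [] [] (by omega)

lemma pv_goNF_acc : ∀ (l cur : List Char) (acc : List (List Char)),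
    pvGoNF l cur acc = acc.reverse ++ pvGoNF l cur [] := by
  intro l
  induction l with
  | nil => intro cur acc; simp [pvGoNF]
  | cons c r ih =>
      intro cur acc
      by_cases hc : c = '/'
      · subst hc
        simp only [pvGoNF, if_pos]
        rw [ih [] (cur.reverse :: acc), ih [] [cur.reverse]]
        simp
      · simp only [pvGoNF, if_neg hc]
        exact ih (c :: cur) acc

lemma pv_splitOn_single {l : List Char} (h : '/' ∉ l) : PySem.Chars.splitOn l ['/'] = [l] := by
  rw [pv_splitOn_eq]
  have aux : ∀ (m : List Char) (cur : List Char), '/' ∉ m → pvGoNF m cur [] = [cur.reverse ++ m] := by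
    intro m
    induction m with
    | nil => intro cur _; simp [pvGoNF]
    | cons c r ih =>
        intro cur hm
        have hc : c ≠ '/' := by intro hc; exact hm (by simp [hc])
        simp only [pvGoNF, if_neg hc]
        rw [ih (c :: cur) (fun hx => hm (by simp [hx]))]
        simp
  rw [aux l [] h]; simp

lemma pv_splitOn_cons {c : List Char} (r : List Char) (h : '/' ∉ c) :
    PySem.Chars.splitOn (c ++ '/' :: r) ['/'] = c :: PySem.Chars.splitOn r ['/'] := by
  rw [pv_splitOn_eq, pv_splitOn_eq]
  have aux : ∀ (m : List Char) (cur : List Char), '/' ∉ m →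
      pvGoNF (m ++ '/' :: r) cur [] = (cur.reverse ++ m) :: pvGoNF r [] [] := by
    intro m
    induction m with
    | nil =>
        intro cur _
        simp only [List.nil_append, pvGoNF, if_pos]
        rw [pv_goNF_acc r [] [cur.reverse]]
        simp
    | cons a m' ih =>
        intro cur hm
        have ha : a ≠ '/' := by intro hx; exact hm (by simp [hx])
        simp only [List.cons_append, pvGoNF, if_neg ha]
        rw [ih (a :: cur) (fun hx => hm (by simp [hx]))]
        simp
  rw [aux c [] h]; simp

lemma pv_splitOn_ne_nil (l : List Char) : PySem.Chars.splitOn l ['/'] ≠ [] := by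
  rw [pv_splitOn_eq]
  have aux : ∀ (m cur : List Char) (acc : List (List Char)), pvGoNF m cur acc ≠ [] := by
    intro m
    induction m with
    | nil => intro cur acc; simp [pvGoNF]
    | cons c r ih =>
        intro cur acc
        by_cases hc : c = '/'
        · subst hc; simp only [pvGoNF, if_pos]; exact ih [] (cur.reverse :: acc)
        · simp only [pvGoNF, if_neg hc]; exact ih (c :: cur) acc
  exact aux l [] []

-- last element via Python's xs[-1]
lemma pv_pyGet_neg_one {α : Type} (xs : List α) (h : xs ≠ []) :
    PySem.List.pyGet? xs (-1) = xs.getLast? := by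
  have hlen : xs.length ≠ 0 := by simpa [List.length_eq_zero_iff] using h
  simp only [PySem.List.pyGet?, PySem.List.pyIdx?, List.getLast?_eq_getElem?]
  have h1 : (-(xs.length:Int) ≤ -1) := by omega
  simp [h1]

lemma pv_infix_of_prefix_drop {p l : List Char} {i : Nat} (h : p <+: l.drop i) : p <:+: l := by
  obtain ⟨t, ht⟩ := h
  refine ⟨l.take i, t, ?_⟩
  rw [List.append_assoc, ht]
  simp

lemma pv_prefix_append_of_le {p X Y : List Char} (h : p <+: X ++ Y) (hl : p.length ≤ X.length) :
    p <+: X := by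
  have h2 : p = X.take p.length := by
    rw [List.prefix_iff_eq_take] at h
    rw [h, List.take_append, Nat.sub_eq_zero_of_le hl]
    simp
  rw [h2]
  exact List.take_prefix _ _

lemma pv_mem_of_prefix_append_long {p X Y : List Char} {y : Char} (h : p <+: X ++ y :: Y)
    (hl : X.length < p.length) : y ∈ p := by
  obtain ⟨t, ht⟩ := h
  have hlt : X.length < (p ++ t).length := by rw [ht]; simp
  have hy : (X ++ y :: Y)[X.length]'(by simp) = y := by
    rw [List.getElem_append_right le_rfl]
    simp
  have h1 : (p ++ t)[X.length]'hlt = (X ++ y :: Y)[X.length]'(by simp) := List.getElem_of_eq ht _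
  have h2 : (p ++ t)[X.length]'hlt = p[X.length]'hl := List.getElem_append_left hl
  have h3 : p[X.length]'hl = y := by rw [← h2, h1, hy]
  rw [← h3]
  exact List.getElem_mem _

-- find is characterised by its first occurrence
lemma pv_find_eq_of {s sub : List Char} {n : Nat} (h1 : sub <+: s.drop n)
    (h2 : ∀ i, i < n → ¬ sub <+: s.drop i) : PySem.Chars.find s sub = n := by
  have hinf : sub <:+: s := pv_infix_of_prefix_drop h1
  have hge := (PySem.Chars.find_nonneg_iff s sub).mpr hinf
  obtain ⟨hp, hmin⟩ := PySem.Chars.find_spec hge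
  have htn := Int.toNat_of_nonneg hge
  have : (PySem.Chars.find s sub).toNat = n := by
    rcases lt_trichotomy (PySem.Chars.find s sub).toNat n with hlt | heq | hgt
    · exact absurd hp (h2 _ hlt)
    · exact heq
    · exact absurd h1 (hmin n hgt)
  omega




-- an occurrence of a '/'-free pattern lies inside one component
lemma pv_infix_split {pat c r : List Char} (hp : '/' ∉ pat) (h : pat <:+: c ++ '/' :: r) :
    pat <:+: c ∨ pat <:+: r := by
  obtain ⟨u, v, huv⟩ := h
  have hocc : pat <+: (c ++ '/' :: r).drop u.length := by
    rw [← huv]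
    simp
  by_cases hi : u.length ≤ c.length
  · have hdrop : (c ++ '/' :: r).drop u.length = c.drop u.length ++ '/' :: r := by
      rw [List.drop_append, Nat.sub_eq_zero_of_le hi, List.drop_zero]
    rw [hdrop] at hocc
    by_cases hfit : pat.length ≤ (c.drop u.length).length
    · exact Or.inl (pv_infix_of_prefix_drop (pv_prefix_append_of_le hocc hfit))
    · exact absurd (pv_mem_of_prefix_append_long hocc (by omega)) hp
  · have hdrop : (c ++ '/' :: r).drop u.length = r.drop (u.length - c.length - 1) := by
      rw [List.drop_append]
      rw [List.drop_eq_nil_of_le (by omega), List.nil_append]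
      rcases Nat.exists_eq_add_of_lt (by omega : c.length < u.length) with ⟨k, hk⟩
      have h1 : u.length - c.length = k + 1 := by omega
      have h2 : u.length - c.length - 1 = k := by omega
      rw [h2, h1, List.drop_succ_cons]
    rw [hdrop] at hocc
    exact Or.inr (pv_infix_of_prefix_drop hocc)

lemma pv_find_append_head {pat c : List Char} (r : List Char) (hp : '/' ∉ pat)
    (hin : pat <:+: c) : PySem.Chars.find (c ++ '/' :: r) pat = PySem.Chars.find c pat := by
  have hge := (PySem.Chars.find_nonneg_iff c pat).mpr hin
  obtain ⟨hpp, hmin⟩ := PySem.Chars.find_spec hge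
  have hle := PySem.Chars.find_le_length c pat
  have htn := Int.toNat_of_nonneg hge
  have hj0 : (PySem.Chars.find c pat).toNat ≤ c.length := by omega
  have heq := pv_find_eq_of (s := c ++ '/' :: r) (sub := pat) (n := (PySem.Chars.find c pat).toNat)
    (by
      rw [List.drop_append, Nat.sub_eq_zero_of_le hj0, List.drop_zero]
      exact hpp.trans (List.prefix_append _ _))
    (by
      intro i hi hcontra
      have hdrop : (c ++ '/' :: r).drop i = c.drop i ++ '/' :: r := by
        rw [List.drop_append, Nat.sub_eq_zero_of_le (by omega), List.drop_zero]
      rw [hdrop] at hcontra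
      by_cases hfit : pat.length ≤ (c.drop i).length
      · exact hmin i hi (pv_prefix_append_of_le hcontra hfit)
      · exact hp (pv_mem_of_prefix_append_long hcontra (by omega)))
  rw [heq]; omega

lemma pv_find_append_cons {pat c r : List Char} (hp : '/' ∉ pat) (hnot : ¬ pat <:+: c)
    (hin : pat <:+: r) :
    PySem.Chars.find (c ++ '/' :: r) pat = c.length + 1 + PySem.Chars.find r pat := by
  have hge := (PySem.Chars.find_nonneg_iff r pat).mpr hin
  obtain ⟨hpp, hmin⟩ := PySem.Chars.find_spec hge
  have htn := Int.toNat_of_nonneg hge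
  have heq := pv_find_eq_of (s := c ++ '/' :: r) (sub := pat)
    (n := c.length + 1 + (PySem.Chars.find r pat).toNat)
    (by
      have hdrop : (c ++ '/' :: r).drop (c.length + 1 + (PySem.Chars.find r pat).toNat)
          = r.drop (PySem.Chars.find r pat).toNat := by
        rw [List.drop_append, List.drop_eq_nil_of_le (by omega), List.nil_append]
        have h1 : c.length + 1 + (PySem.Chars.find r pat).toNat - c.length
            = (PySem.Chars.find r pat).toNat + 1 := by omega
        rw [h1, List.drop_succ_cons]
      rw [hdrop]; exact hpp)
    (by
      intro i hi hcontra
      by_cases hic : i ≤ c.length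
      · have hdrop : (c ++ '/' :: r).drop i = c.drop i ++ '/' :: r := by
          rw [List.drop_append, Nat.sub_eq_zero_of_le hic, List.drop_zero]
        rw [hdrop] at hcontra
        by_cases hfit : pat.length ≤ (c.drop i).length
        · exact hnot (pv_infix_of_prefix_drop (pv_prefix_append_of_le hcontra hfit))
        · exact hp (pv_mem_of_prefix_append_long hcontra (by omega))
      · have hdrop : (c ++ '/' :: r).drop i = r.drop (i - c.length - 1) := by
          rw [List.drop_append, List.drop_eq_nil_of_le (by omega), List.nil_append]
          rcases Nat.exists_eq_add_of_lt (by omega : c.length < i) with ⟨k, hk⟩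
          have h1 : i - c.length = k + 1 := by omega
          have h2 : i - c.length - 1 = k := by omega
          rw [h2, h1, List.drop_succ_cons]
        rw [hdrop] at hcontra
        exact hmin (i - c.length - 1) (by omega) hcontra)
  rw [heq]
  push_cast
  omega

lemma pv_find_slash_absent {X : List Char} (h : '/' ∉ X) : PySem.Chars.find X ['/'] = -1 := by
  rw [PySem.Chars.find_eq_neg_one_iff]
  exact fun hinf => h (hinf.subset (by simp))

lemma pv_find_slash_here {X : List Char} (r : List Char) (h : '/' ∉ X) :
    PySem.Chars.find (X ++ '/' :: r) ['/'] = X.length := by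
  have heq := pv_find_eq_of (s := X ++ '/' :: r) (sub := ['/']) (n := X.length)
    (by
      rw [List.drop_append, Nat.sub_eq_zero_of_le le_rfl, List.drop_zero,
        List.drop_eq_nil_of_le le_rfl, List.nil_append]
      exact ⟨r, rfl⟩)
    (by
      intro i hi hcontra
      have hdrop : (X ++ '/' :: r).drop i = X.drop i ++ '/' :: r := by
        rw [List.drop_append, Nat.sub_eq_zero_of_le (by omega), List.drop_zero]
      rw [hdrop] at hcontra
      have hfit : (['/'] : List Char).length ≤ (X.drop i).length := by simp; omega
      have := (pv_prefix_append_of_le hcontra hfit).subset (show '/' ∈ (['/'] : List Char) by simp)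
      exact h (List.mem_of_mem_drop this))
  rw [heq]

lemma pv_exists_slash_split {l : List Char} (h : '/' ∈ l) :
    ∃ c r, l = c ++ '/' :: r ∧ '/' ∉ c := by
  induction l with
  | nil => simp at h
  | cons c r ih =>
      by_cases hc : c = '/'
      · exact ⟨[], r, by simp [hc], by simp⟩
      · have hr : '/' ∈ r := by
          rcases List.mem_cons.mp h with h1 | h1
          · exact absurd h1.symm hc
          · exact h1
        obtain ⟨c0, r0, heq, hn⟩ := ih hr
        exact ⟨c :: c0, r0, by simp [heq], by simp [Ne.symm hc, hn]⟩

-- some component of a string containing a '/'-free pattern contains the pattern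
lemma pv_exists_part : ∀ (n : Nat) (r : List Char), r.length ≤ n → '/' ∉ "run_".toList →
    "run_".toList <:+: r →
    ∃ p ∈ PySem.Chars.splitOn r ['/'], PySem.Chars.isIn "run_".toList p = true := by
  intro n
  induction n with
  | zero =>
      intro r hlen _ hin
      have hr : r = [] := List.length_eq_zero_iff.mp (Nat.le_zero.mp hlen)
      subst hr
      have := List.eq_nil_of_infix_nil hin
      simp at this
  | succ n ih =>
      intro r hlen hps hin
      by_cases hsl : '/' ∈ r
      · obtain ⟨c, r0, heq, hc⟩ := pv_exists_slash_split hsl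
        subst heq
        rw [pv_splitOn_cons r0 hc]
        rcases pv_infix_split hps hin with hl | hr
        · exact ⟨c, by simp, (PySem.Chars.isIn_iff_infix _ _).mpr hl⟩
        · have hlen0 : r0.length ≤ n := by
            simp [List.length_append] at hlen; omega
          obtain ⟨p, hpm, hpi⟩ := ih r0 hlen0 hps hr
          exact ⟨p, by simp [hpm], hpi⟩
      · rw [pv_splitOn_single hsl]
        exact ⟨r, by simp, (PySem.Chars.isIn_iff_infix _ _).mpr hin⟩

lemma pv_str_split (s : String) :
    (PySem.Str.split? s "/").getD [] = (PySem.Chars.splitOn s.toList ['/']).map String.ofList := by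
  simp [PySem.Str.split?, PySem.Chars.split?]

lemma pv_f_single (s : String) (h : '/' ∉ s.toList) :
    (PySem.List.pyGet? ((PySem.Str.split? s "/").getD []) (-1)).getD "" = s := by
  rw [pv_str_split, pv_splitOn_single h]
  rw [pv_pyGet_neg_one _ (by simp)]
  simp

lemma pv_f_cons (c : List Char) (hc : '/' ∉ c) (s t : String)
    (h : s.toList = c ++ '/' :: t.toList) :
    (PySem.List.pyGet? ((PySem.Str.split? s "/").getD []) (-1)).getD ""
      = (PySem.List.pyGet? ((PySem.Str.split? t "/").getD []) (-1)).getD "" := by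
  rw [pv_str_split, pv_str_split, h, pv_splitOn_cons _ hc]
  have hne : (PySem.Chars.splitOn t.toList ['/']).map String.ofList ≠ [] := by
    simp [pv_splitOn_ne_nil]
  rw [List.map_cons, pv_pyGet_neg_one _ (by simp), pv_pyGet_neg_one _ hne,
    List.getLast?_cons, List.getLast?_eq_getLast_of_ne_nil hne]
  simp

lemma pv_A_head (path : String) (c : List Char) (rest : List String)
    (hparts : (PySem.Str.split? path "/").getD [] = String.ofList c :: rest)
    (hmatch : PySem.Str.isIn "run_" (String.ofList c) = true) :
    get_run_path_and_id path =
      (some ((PySem.List.pyGet? ((PySem.Str.split? (String.ofList c) "_").getD []) 1).getD ""),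
        String.ofList c) := by
  have hne : String.ofList c ≠ "" := by
    intro h
    have : PySem.Str.isIn "run_" "" = true := h ▸ hmatch
    rw [PySem.Str.isIn_iff_infix] at this
    have := this.length_le
    simp at this
  have hfind : (String.ofList c :: rest).find? (fun part => PySem.Str.isIn "run_" part)
      = some (String.ofList c) := List.find?_cons_of_pos hmatch
  have hidx : PySem.List.index? (String.ofList c :: rest) (String.ofList c) = some 0 :=
    by rw [PySem.List.index?_cons_self]
  have hj : PySem.Str.join "/" [String.ofList c] = String.ofList c := by
    have h2 := congrArg String.ofList (PySem.Str.toList_join "/" [String.ofList c])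
    rw [String.ofList_toList] at h2
    rw [h2, List.map_singleton, PySem.Chars.join_singleton, String.ofList_toList]
  simp only [get_run_path_and_id, hparts, hfind, hne, ne_eq, not_false_eq_true, if_true,
    hidx, Option.getD_some]
  rw [PySem.List.slice_to _ (by omega)]
  have h1 : ((0 + 1 : Nat) : Int).toNat = 1 := by omega
  rw [h1, List.take_succ_cons, List.take_zero, hj]

lemma pv_drop_append_small {c : List Char} {m : Nat} (r : List Char) (hm : m ≤ c.length) :
    (c ++ '/' :: r).drop m = c.drop m ++ '/' :: r := by
  rw [List.drop_append, Nat.sub_eq_zero_of_le hm, List.drop_zero]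

lemma pv_drop_append_big (c r : List Char) (m : Nat) :
    (c ++ '/' :: r).drop (c.length + 1 + m) = r.drop m := by
  rw [List.drop_append, List.drop_eq_nil_of_le (by omega), List.nil_append]
  have h1 : c.length + 1 + m - c.length = m + 1 := by omega
  rw [h1, List.drop_succ_cons]

lemma pv_take_append_big (c r : List Char) (m : Nat) :
    (c ++ '/' :: r).take (c.length + 1 + m) = c ++ '/' :: r.take m := by
  rw [List.take_append, List.take_of_length_le (by omega)]
  have h1 : c.length + 1 + m - c.length = m + 1 := by omega
  rw [h1, List.take_succ_cons]

lemma pv_A_cons (c r : List Char) (hc : '/' ∉ c) (hcm : ¬ "run_".toList <:+: c)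
    (hin : "run_".toList <:+: r) (path : String) (hl : path.toList = c ++ '/' :: r) :
    get_run_path_and_id path = ((get_run_path_and_id (String.ofList r)).1,
      String.ofList (c ++ '/' :: (get_run_path_and_id (String.ofList r)).2.toList)) := by
  have hpartsP : (PySem.Str.split? path "/").getD []
      = String.ofList c :: (PySem.Chars.splitOn r ['/']).map String.ofList := by
    rw [pv_str_split, hl, pv_splitOn_cons _ hc, List.map_cons]
  have hpartsR : (PySem.Str.split? (String.ofList r) "/").getD []
      = (PySem.Chars.splitOn r ['/']).map String.ofList := by
    rw [pv_str_split, String.toList_ofList]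
  obtain ⟨p, hpm, hpi⟩ := pv_exists_part r.length r le_rfl (by decide) hin
  obtain ⟨rc, hrc⟩ : ∃ rc, ((PySem.Chars.splitOn r ['/']).map String.ofList).find?
      (fun part => PySem.Str.isIn "run_" part) = some rc := by
    apply Option.isSome_iff_exists.mp
    apply List.find?_isSome.mpr
    refine ⟨String.ofList p, List.mem_map_of_mem hpm, ?_⟩
    rw [PySem.Str.isIn_eq]
    simp only [String.toList_ofList]
    simpa using hpi
  have hrcP : PySem.Str.isIn "run_" rc = true := by simpa using List.find?_some hrc
  have hcneg : PySem.Str.isIn "run_" (String.ofList c) = false := by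
    rw [PySem.Str.isIn_eq]
    simp only [String.toList_ofList]
    exact (PySem.Chars.isIn_eq_false_iff "run_".toList c).mpr hcm
  have hrcne : rc ≠ "" := by
    intro h
    rw [h, PySem.Str.isIn_iff_infix] at hrcP
    have := hrcP.length_le
    simp at this
  have hfindP : (String.ofList c :: (PySem.Chars.splitOn r ['/']).map String.ofList).find?
      (fun part => PySem.Str.isIn "run_" part) = some rc := by
    rw [List.find?_cons_of_neg (by simpa using hcneg)]
    exact hrc
  have hmem : rc ∈ (PySem.Chars.splitOn r ['/']).map String.ofList :=
    List.mem_of_find?_eq_some hrc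
  obtain ⟨i, hi⟩ := Option.isSome_iff_exists.mp
    ((PySem.List.index?_isSome_iff _ _).mpr hmem)
  have hcine : String.ofList c ≠ rc := by
    intro h
    rw [← h, hcneg] at hrcP
    exact Bool.false_ne_true hrcP
  have hidxP : PySem.List.index? (String.ofList c :: (PySem.Chars.splitOn r ['/']).map String.ofList) rc
      = some (i + 1) := by
    rw [PySem.List.index?_cons_of_ne _ hcine, hi]
    rfl
  obtain ⟨hilt, -⟩ := PySem.List.getElem_of_index?_eq_some hi
  obtain ⟨q, qs, hq⟩ : ∃ q qs, ((PySem.Chars.splitOn r ['/']).map String.ofList).take (i+1) = q :: qs := by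
    cases hqq : ((PySem.Chars.splitOn r ['/']).map String.ofList).take (i+1) with
    | nil =>
        exfalso
        rcases List.take_eq_nil_iff.mp hqq with h | h
        · exact Nat.succ_ne_zero i h
        · rw [h] at hilt; simp at hilt
    | cons q qs => exact ⟨q, qs, rfl⟩
  have hAr : get_run_path_and_id (String.ofList r)
      = (some ((PySem.List.pyGet? ((PySem.Str.split? rc "_").getD []) 1).getD ""),
         PySem.Str.join "/" (q :: qs)) := by
    simp only [get_run_path_and_id, hpartsR, hrc, hrcne, ne_eq, not_false_eq_true, if_true,
      hi, Option.getD_some]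
    rw [PySem.List.slice_to _ (by omega)]
    have h1 : ((i + 1 : Nat) : Int).toNat = i + 1 := by omega
    rw [h1, hq]
  have hAp : get_run_path_and_id path
      = (some ((PySem.List.pyGet? ((PySem.Str.split? rc "_").getD []) 1).getD ""),
         PySem.Str.join "/" (String.ofList c :: q :: qs)) := by
    simp only [get_run_path_and_id, hpartsP, hfindP, hrcne, ne_eq, not_false_eq_true, if_true,
      hidxP, Option.getD_some]
    rw [PySem.List.slice_to _ (by omega)]
    have h1 : ((i + 1 + 1 : Nat) : Int).toNat = i + 2 := by omega
    rw [h1, List.take_succ_cons, hq]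
  rw [hAp, hAr]
  refine Prod.ext rfl ?_
  show PySem.Str.join "/" (String.ofList c :: q :: qs)
      = String.ofList (c ++ '/' :: (PySem.Str.join "/" (q :: qs)).toList)
  have hlhs : (PySem.Str.join "/" (String.ofList c :: q :: qs)).toList
      = c ++ '/' :: (PySem.Str.join "/" (q :: qs)).toList := by
    rw [PySem.Str.toList_join, List.map_cons, List.map_cons, PySem.Chars.join_cons_cons,
      ← List.map_cons, ← PySem.Str.toList_join]
    simp [String.toList_ofList]
  rw [← hlhs, String.ofList_toList]

lemma pv_B_cons (c r : List Char) (hc : '/' ∉ c) (hcm : ¬ "run_".toList <:+: c)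
    (hin : "run_".toList <:+: r) (path : String) (hl : path.toList = c ++ '/' :: r) :
    get_run_path_and_id_alt path = ((get_run_path_and_id_alt (String.ofList r)).1,
      String.ofList (c ++ '/' :: (get_run_path_and_id_alt (String.ofList r)).2.toList)) := by
  have hpat : "run_".toList = ['r','u','n','_'] := rfl
  have hdc : "/".toList = ['/'] := rfl
  rw [hpat] at hcm hin
  have hps : '/' ∉ ['r','u','n','_'] := by decide
  have hge : 0 ≤ PySem.Chars.find r ['r','u','n','_'] := (PySem.Chars.find_nonneg_iff _ _).mpr hin
  have hjrlen := PySem.Chars.find_le_length r ['r','u','n','_']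
  have hfindP : PySem.Str.find path "run_" = ↑c.length + 1 + PySem.Chars.find r ['r','u','n','_'] := by
    rw [PySem.Str.find_eq, hl, hpat]
    exact pv_find_append_cons hps hcm hin
  have hfindR : PySem.Str.find (String.ofList r) "run_" = PySem.Chars.find r ['r','u','n','_'] := by
    rw [PySem.Str.find_eq, String.toList_ofList, hpat]
  have hlen : path.toList.length = c.length + 1 + r.length := by
    rw [hl]; simp; omega
  have hkP : PySem.Str.findFrom path "/" (↑c.length + 1 + PySem.Chars.find r ['r','u','n','_']) none
      = if PySem.Chars.find (r.drop (PySem.Chars.find r ['r','u','n','_']).toNat) ['/'] = -1 then -1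
        else ↑(c.length + 1 + (PySem.Chars.find r ['r','u','n','_']).toNat)
          + PySem.Chars.find (r.drop (PySem.Chars.find r ['r','u','n','_']).toNat) ['/'] := by
    rw [PySem.Str.findFrom_eq, hdc]
    have hcast : (↑c.length + 1 + PySem.Chars.find r ['r','u','n','_'] : Int)
        = ((c.length + 1 + (PySem.Chars.find r ['r','u','n','_']).toNat : Nat) : Int) := by omega
    rw [hcast, PySem.Chars.findFrom_natCast _ _ _ (by rw [hlen]; omega)]
    rw [hl, pv_drop_append_big]
  have hkR : PySem.Str.findFrom (String.ofList r) "/" (PySem.Chars.find r ['r','u','n','_']) none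
      = if PySem.Chars.find (r.drop (PySem.Chars.find r ['r','u','n','_']).toNat) ['/'] = -1 then -1
        else ↑(PySem.Chars.find r ['r','u','n','_']).toNat
          + PySem.Chars.find (r.drop (PySem.Chars.find r ['r','u','n','_']).toNat) ['/'] := by
    have hjrn : PySem.Chars.find r ['r','u','n','_']
        = ↑(PySem.Chars.find r ['r','u','n','_']).toNat := (Int.toNat_of_nonneg hge).symm
    rw [PySem.Str.findFrom_eq, hdc, String.toList_ofList, hjrn,
      PySem.Chars.findFrom_natCast _ _ _ (by omega)]
    simp only [Int.toNat_natCast]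
  have hDge := PySem.Chars.neg_one_le_find (r.drop (PySem.Chars.find r ['r','u','n','_']).toNat) ['/']
  simp only [get_run_path_and_id_alt, hfindP, hfindR, hkP, hkR]
  rw [if_pos (show (↑c.length + 1 + PySem.Chars.find r ['r','u','n','_'] : Int) ≠ -1 by omega)]
  rw [if_pos (show PySem.Chars.find r ['r','u','n','_'] ≠ -1 by omega)]
  by_cases hD1 : PySem.Chars.find (r.drop (PySem.Chars.find r ['r','u','n','_']).toNat) ['/'] = -1
  · rw [if_pos hD1, if_pos hD1,
      if_pos (rfl : (-1:Int) = -1), if_pos (rfl : (-1:Int) = -1)]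
    have hpath : path = String.ofList (c ++ '/' :: (String.ofList r).toList) := by
      rw [String.toList_ofList, ← hl, String.ofList_toList]
    have hf := pv_f_cons c hc path (String.ofList r) (by rw [String.toList_ofList]; exact hl)
    refine Prod.ext ?_ ?_
    · simp [hf]
    · simpa using hpath
  · rw [if_neg hD1, if_neg hD1]
    rw [if_neg (show ¬ ((↑(c.length + 1 + (PySem.Chars.find r ['r','u','n','_']).toNat) : Int)
        + PySem.Chars.find (r.drop (PySem.Chars.find r ['r','u','n','_']).toNat) ['/'] = -1) by omega)]
    rw [if_neg (show ¬ ((↑(PySem.Chars.find r ['r','u','n','_']).toNat : Int)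
        + PySem.Chars.find (r.drop (PySem.Chars.find r ['r','u','n','_']).toNat) ['/'] = -1) by omega)]
    have hsubP : (PySem.Str.slice path none (some (↑(c.length + 1 + (PySem.Chars.find r ['r','u','n','_']).toNat)
        + PySem.Chars.find (r.drop (PySem.Chars.find r ['r','u','n','_']).toNat) ['/']))).toList
        = c ++ '/' :: (PySem.Str.slice (String.ofList r) none (some (↑(PySem.Chars.find r ['r','u','n','_']).toNat
          + PySem.Chars.find (r.drop (PySem.Chars.find r ['r','u','n','_']).toNat) ['/']))).toList := by
      rw [PySem.Str.toList_slice, PySem.Str.toList_slice, String.toList_ofList,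
        PySem.Chars.slice_eq_listSlice, PySem.Chars.slice_eq_listSlice]
      rw [PySem.List.slice_to _ (by omega), PySem.List.slice_to _ (by omega)]
      have hc1 : ((↑(c.length + 1 + (PySem.Chars.find r ['r','u','n','_']).toNat) : Int)
          + PySem.Chars.find (r.drop (PySem.Chars.find r ['r','u','n','_']).toNat) ['/']).toNat
          = c.length + 1 + ((PySem.Chars.find r ['r','u','n','_']).toNat
            + (PySem.Chars.find (r.drop (PySem.Chars.find r ['r','u','n','_']).toNat) ['/']).toNat) := by
        omega
      have hc2 : ((↑(PySem.Chars.find r ['r','u','n','_']).toNat : Int)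
          + PySem.Chars.find (r.drop (PySem.Chars.find r ['r','u','n','_']).toNat) ['/']).toNat
          = (PySem.Chars.find r ['r','u','n','_']).toNat
            + (PySem.Chars.find (r.drop (PySem.Chars.find r ['r','u','n','_']).toNat) ['/']).toNat := by
        omega
      rw [hc1, hc2, hl, pv_take_append_big]
    have hf := pv_f_cons c hc _ _ hsubP
    exact Prod.ext (by simp only [hf]) (by rw [← hsubP, String.ofList_toList])

lemma pv_main : ∀ (n : Nat) (path : String), path.toList.length ≤ n →
    Pre_get_run_path_and_id path → get_run_path_and_id path = get_run_path_and_id_alt path := by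
  intro n
  induction n with
  | zero =>
      intro path hlen hpre
      exfalso
      have h0 : path.toList = [] := List.length_eq_zero_iff.mp (Nat.le_zero.mp hlen)
      unfold Pre_get_run_path_and_id at hpre
      rw [PySem.Str.isIn_iff_infix, h0] at hpre
      have := List.eq_nil_of_infix_nil hpre
      simp at this
  | succ n ih =>
      intro path hlen hpre
      have hps' : '/' ∉ "run_".toList := by decide
      have hpreL : "run_".toList <:+: path.toList := by
        unfold Pre_get_run_path_and_id at hpre
        exact (PySem.Str.isIn_iff_infix _ _).mp hpre
      by_cases hsl : '/' ∈ path.toList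
      · obtain ⟨c, r, hl, hc⟩ := pv_exists_slash_split hsl
        by_cases hin : "run_".toList <:+: c
        · -- the first component contains "run_"
          have hparts : (PySem.Str.split? path "/").getD []
              = String.ofList c :: (PySem.Chars.splitOn r ['/']).map String.ofList := by
            rw [pv_str_split, hl, pv_splitOn_cons _ hc, List.map_cons]
          have hmatch : PySem.Str.isIn "run_" (String.ofList c) = true := by
            rw [PySem.Str.isIn_eq]
            simp only [String.toList_ofList]
            simpa using (PySem.Chars.isIn_iff_infix "run_".toList c).mpr hin
          rw [pv_A_head path c _ hparts hmatch]
          have hge0 : 0 ≤ PySem.Chars.find c "run_".toList :=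
            (PySem.Chars.find_nonneg_iff _ _).mpr hin
          have hfcl := PySem.Chars.find_le_length c "run_".toList
          have hfind : PySem.Str.find path "run_" = PySem.Chars.find c "run_".toList := by
            rw [PySem.Str.find_eq, hl]
            exact pv_find_append_head r hps' hin
          have hlenp : path.toList.length = c.length + 1 + r.length := by
            rw [hl]; simp; omega
          have hnosl : '/' ∉ c.drop (PySem.Chars.find c "run_".toList).toNat :=
            fun hmem => hc (List.mem_of_mem_drop hmem)
          have hk : PySem.Str.findFrom path "/" (PySem.Chars.find c "run_".toList) none
              = ↑c.length := by
            have hdc : "/".toList = ['/'] := rfl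
            rw [PySem.Str.findFrom_eq, hdc]
            have hjn : PySem.Chars.find c "run_".toList
                = ↑(PySem.Chars.find c "run_".toList).toNat := (Int.toNat_of_nonneg hge0).symm
            rw [hjn, PySem.Chars.findFrom_natCast _ _ _ (by rw [hlenp]; omega)]
            rw [hl, pv_drop_append_small r (by omega), pv_find_slash_here _ hnosl]
            have hlend : (c.drop (PySem.Chars.find c "run_".toList).toNat).length
                = c.length - (PySem.Chars.find c "run_".toList).toNat := by simp
            rw [hlend, if_neg (by omega)]
            omega
          have hsub : PySem.Str.slice path none (some ↑c.length) = String.ofList c := by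
            have h1 : (PySem.Str.slice path none (some ↑c.length)).toList = c := by
              rw [PySem.Str.toList_slice, PySem.Chars.slice_eq_listSlice,
                PySem.List.slice_to _ (by omega), hl]
              have h2 : ((c.length : Int)).toNat = c.length := by omega
              rw [h2]
              exact List.take_left
            have h3 := congrArg String.ofList h1
            rw [String.ofList_toList] at h3
            exact h3
          simp only [get_run_path_and_id_alt, hfind, hk]
          rw [if_pos (show PySem.Chars.find c "run_".toList ≠ -1 by omega)]
          rw [if_neg (show ¬ ((c.length : Int) = -1) by omega)]
          rw [hsub, pv_f_single (String.ofList c) (by rw [String.toList_ofList]; exact hc)]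
        · -- recurse on the remainder after the first '/'
          have hinr : "run_".toList <:+: r := by
            rcases pv_infix_split hps' (hl ▸ hpreL) with h | h
            · exact absurd h hin
            · exact h
          have hlen' : r.length ≤ n := by
            have h4 : path.toList.length = c.length + 1 + r.length := by
              rw [hl]; simp; omega
            omega
          have hpre' : Pre_get_run_path_and_id (String.ofList r) := by
            unfold Pre_get_run_path_and_id
            rw [PySem.Str.isIn_iff_infix, String.toList_ofList]
            simpa using hinr
          rw [pv_A_cons c r hc hin hinr path hl, pv_B_cons c r hc hin hinr path hl,
            ih (String.ofList r) (by rw [String.toList_ofList]; exact hlen') hpre']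
      · -- no '/' in the path at all
        have hparts : (PySem.Str.split? path "/").getD []
            = String.ofList path.toList :: ([] : List String) := by
          rw [pv_str_split, pv_splitOn_single hsl, List.map_singleton]
        have hmatch : PySem.Str.isIn "run_" (String.ofList path.toList) = true := by
          rw [String.ofList_toList]
          exact hpre
        rw [pv_A_head path path.toList [] hparts hmatch]
        have hge0 : 0 ≤ PySem.Chars.find path.toList "run_".toList :=
          (PySem.Chars.find_nonneg_iff _ _).mpr hpreL
        have hfl := PySem.Chars.find_le_length path.toList "run_".toList
        have hfind : PySem.Str.find path "run_" = PySem.Chars.find path.toList "run_".toList :=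
          PySem.Str.find_eq _ _
        have hk : PySem.Str.findFrom path "/" (PySem.Chars.find path.toList "run_".toList) none
            = -1 := by
          have hdc : "/".toList = ['/'] := rfl
          rw [PySem.Str.findFrom_eq, hdc]
          have hjn : PySem.Chars.find path.toList "run_".toList
              = ↑(PySem.Chars.find path.toList "run_".toList).toNat :=
            (Int.toNat_of_nonneg hge0).symm
          rw [hjn, PySem.Chars.findFrom_natCast _ _ _ (by omega)]
          rw [pv_find_slash_absent (fun hmem => hsl (List.mem_of_mem_drop hmem))]
          simp
        simp only [get_run_path_and_id_alt, hfind, hk]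
        rw [if_pos (show PySem.Chars.find path.toList "run_".toList ≠ -1 by omega)]
        simp only [if_true]
        rw [pv_f_single path hsl, String.ofList_toList]

-- ===== VERDICT (by name: the statement is the Claim_ definition above) =====
theorem get_run_path_and_id_spec : Claim_equal_get_run_path_and_id := by
  intro path _ hpre
  exact pv_main path.toList.length path le_rfl hpre
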